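-- pv_equiv track=rewrite | github.com/candeela/preguntados | stark3.py | obtener_minimo
-- ===== SOURCE A (Python) =====
-- def obtener_minimo(lista_personajes:list, clave:str):
--     if lista_personajes == [] and type(clave) != float and type(clave) != int:
--         return False
--     else:
--         minimo = lista_personajes [0]
--         for heroe in lista_personajes:
--             if heroe[clave] < minimo [clave]:
--                     minimo = heroe
--
--     return minimo['nombre'], minimo[clave]
-- ===== SOURCE B (Python) =====
-- def obtener_minimo(lista_personajes: list, clave: str):
--     if lista_personajes == [] and type(clave) != float and type(clave) != int:
--         return False
--     m = min(heroe[clave] for heroe in lista_personajes)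
--     ganador = next(heroe for heroe in lista_personajes if heroe[clave] == m)
--     return ganador['nombre'], m
-- ===== Notes on version B (the rewrite author's own statement) =====
-- stated objective: alternative
-- what changed: Instead of a single strict-< running-minimum scan over the dicts, B first computes the minimum key value with min() over the projected values and then takes the first character whose value equals that minimum (two staged passes).
-- outside the precondition, e.g. on obtener_minimo([], 'x'): A returns False, B returns False; on obtener_minimo([{'nombre': 'a', 'k': '1'}, {'k': '2'}], 'k'): A returns ('a', '1'), B returns ('a', '1')
import Mathlib
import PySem

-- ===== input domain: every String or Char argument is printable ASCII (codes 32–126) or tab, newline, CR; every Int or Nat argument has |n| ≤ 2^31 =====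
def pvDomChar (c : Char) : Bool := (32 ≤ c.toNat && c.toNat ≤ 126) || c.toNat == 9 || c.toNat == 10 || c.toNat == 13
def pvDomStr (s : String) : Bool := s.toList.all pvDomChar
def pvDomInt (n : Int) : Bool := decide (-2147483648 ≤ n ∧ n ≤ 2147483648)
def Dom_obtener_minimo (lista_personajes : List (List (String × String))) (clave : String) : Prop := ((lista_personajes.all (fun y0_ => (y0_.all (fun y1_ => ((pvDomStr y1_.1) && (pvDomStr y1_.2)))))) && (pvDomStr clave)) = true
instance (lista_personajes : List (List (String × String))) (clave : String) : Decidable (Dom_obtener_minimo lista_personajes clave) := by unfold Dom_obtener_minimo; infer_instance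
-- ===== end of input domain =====

-- B replaces A's strict-< running-minimum scan by two staged passes (min of the
-- projected key values, then first character attaining it); alternative, not faster.


-- ===== PORT A =====
-- dict lookup h[k] (first match); exact wherever the key is present (Pre_ guarantees
-- presence of every key either port reads)
def pvLookupD (d : List (String × String)) (k : String) : String :=
  match d with
  | [] => ""
  | (a, b) :: t => if a == k then b else pvLookupD t k

def obtener_minimo (lista_personajes : List (List (String × String))) (clave : String) : String × String :=
  -- clave is always a str here, so Python's guard reduces to the emptiness test;
  -- on [] Python returns False (not a String × String) — excluded by Pre_, ("", "") is junk
  if lista_personajes = [] then ("", "")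
  else
    let minimo := lista_personajes.foldl
      (fun minimo heroe => if pvLookupD heroe clave < pvLookupD minimo clave then heroe else minimo)
      (lista_personajes.headD [])
    (pvLookupD minimo "nombre", pvLookupD minimo clave)

-- ===== PORT B =====
def obtener_minimo_alt (lista_personajes : List (List (String × String))) (clave : String) : String × String :=
  if lista_personajes = [] then ("", "")
  else
    let m := (PySem.List.min? (lista_personajes.map (fun heroe => pvLookupD heroe clave))
                (fun v => v)).getD ""
    let ganador := (lista_personajes.find? (fun heroe => pvLookupD heroe clave == m)).getD []
    (pvLookupD ganador "nombre", m)

-- ===== PRECONDITION & SPEC =====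
-- Pre_ excludes the empty list, on which A returns the bare bool False — not a value of
-- the declared String × String type (B's guard reproduces that False; see the claim's
-- cite) — and lists in which some dict lacks the key clave or the key 'nombre', where A
-- raises KeyError; requiring 'nombre' on EVERY element is slightly narrower than A,
-- which reads 'nombre' only of the winning element — that excluded-but-returning corner
-- is also cited in the claim, and B matches A there too.
def Pre_obtener_minimo (lista_personajes : List (List (String × String))) (clave : String) : Prop :=
  lista_personajes ≠ [] ∧
  ∀ h ∈ lista_personajes,
    (h.any (fun p => p.1 == clave)) = true ∧ (h.any (fun p => p.1 == "nombre")) = true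
instance (lista_personajes : List (List (String × String))) (clave : String) : Decidable (Pre_obtener_minimo lista_personajes clave) := by unfold Pre_obtener_minimo; infer_instance

def pvWitness_obtener_minimo : (List (List (String × String))) × String :=
  ([[("nombre", "a"), ("hp", "3")], [("nombre", "b"), ("hp", "1")]], "hp")

def Spec_obtener_minimo (lista_personajes : List (List (String × String))) (clave : String) (out : String × String) : Prop := out = obtener_minimo_alt lista_personajes clave
instance (lista_personajes : List (List (String × String))) (clave : String) (out : String × String) : Decidable (Spec_obtener_minimo lista_personajes clave out) := by unfold Spec_obtener_minimo; infer_instance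

-- ===== CLAIM (what is proved, stated in full; the proofs are below) =====
def Claim_equal_obtener_minimo : Prop := ∀ (lista_personajes : List (List (String × String))) (clave : String), Dom_obtener_minimo lista_personajes clave → Pre_obtener_minimo lista_personajes clave → Spec_obtener_minimo lista_personajes clave (obtener_minimo lista_personajes clave)

-- ===== LEMMAS AND PROOFS =====

theorem foldl_min_le_init (l : List String) : ∀ a : String, l.foldl min a ≤ a := by
  induction l with
  | nil => intro a; exact le_refl a
  | cons x t ih =>
      intro a
      exact le_trans (ih (min a x)) (min_le_left a x)

theorem foldl_min_mem_cons (l : List String) : ∀ a : String, l.foldl min a ∈ a :: l := by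
  induction l with
  | nil => intro a; simp
  | cons x t ih =>
      intro a
      simp only [List.foldl_cons]
      rcases List.mem_cons.mp (ih (min a x)) with h | h
      · rw [h]
        rcases min_choice a x with hc | hc <;> rw [hc] <;> simp
      · exact List.mem_cons_of_mem _ (List.mem_cons_of_mem _ h)

-- A's strict-< scan over t starting at y returns the first element of (y :: t)
-- whose key equals the minimum key of (y :: t)
theorem scan_eq_find_min {α : Type} (k : α → String) (d : α) :
    ∀ (t : List α) (y : α),
      t.foldl (fun m h => if k h < k m then h else m) y
        = (List.find? (fun h => k h == (t.map k).foldl min (k y)) (y :: t)).getD d := by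
  intro t
  induction t with
  | nil =>
      intro y
      simp [List.find?]
  | cons x t ih =>
      intro y
      simp only [List.foldl_cons, List.map_cons]
      by_cases hx : k x < k y
      · rw [if_pos hx, ih x]
        have hmin : min (k y) (k x) = k x := min_eq_right (le_of_lt hx)
        rw [hmin]
        -- y's key is strictly above the minimum, so find? skips y
        have hylt : (k y == (t.map k).foldl min (k x)) = false := by
          have hle : (t.map k).foldl min (k x) ≤ k x := foldl_min_le_init _ _
          simp only [beq_eq_false_iff_ne, ne_eq]
          intro h
          exact absurd (h ▸ hle) (not_le.mpr hx)
        show _ = (List.find? _ (y :: x :: t)).getD d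
        simp only [List.find?_cons, hylt]
      · rw [if_neg hx, ih y]
        have hmin : min (k y) (k x) = k y := min_eq_left (not_lt.mp hx)
        rw [hmin]
        by_cases hy : (k y == (t.map k).foldl min (k y)) = true
        · show (List.find? _ (y :: t)).getD d = (List.find? _ (y :: x :: t)).getD d
          simp only [List.find?_cons, hy]
        · -- y does not attain the minimum, hence neither does x (k y ≤ k x)
          have hy' : (k y == (t.map k).foldl min (k y)) = false := by
            simpa using hy
          have hxne : (k x == (t.map k).foldl min (k y)) = false := by
            have hle : (t.map k).foldl min (k y) ≤ k y := foldl_min_le_init _ _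
            simp only [beq_eq_false_iff_ne, ne_eq] at hy' ⊢
            intro h
            exact hy' (le_antisymm hle (h ▸ not_lt.mp hx)).symm
          show (List.find? _ (y :: t)).getD d = (List.find? _ (y :: x :: t)).getD d
          simp only [List.find?_cons, hy', hxne]

theorem obtener_minimo_spec_aux :
    ∀ (lista_personajes : List (List (String × String))) (clave : String),
      obtener_minimo lista_personajes clave = obtener_minimo_alt lista_personajes clave := by
  intro l clave
  cases l with
  | nil => rfl
  | cons x t =>
      unfold obtener_minimo obtener_minimo_alt
      simp only [if_neg (List.cons_ne_nil x t), List.headD_cons, List.foldl_cons, List.map_cons]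
      set k : List (String × String) → String := fun h => pvLookupD h clave with hk
      have h0 : (if k x < k x then x else x) = x := by simp
      rw [h0, PySem.List.min?_id_cons, Option.getD_some]
      rw [scan_eq_find_min k [] t x]
      -- the winner found by find? has exactly the minimal key value
      set m := (t.map k).foldl min (k x) with hm
      have hfind : ∃ w, List.find? (fun h => k h == m) (x :: t) = some w ∧ k w = m := by
        have hmem : m ∈ (x :: t).map k := by
          have : m ∈ (k x) :: t.map k := foldl_min_mem_cons _ _
          simpa using this
        obtain ⟨w, hw, hkw⟩ := List.mem_map.mp hmem
        obtain ⟨v, hv⟩ := (List.find?_isSome (p := fun h => k h == m)).mpr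
          ⟨w, hw, by simp [hkw]⟩ |> Option.isSome_iff_exists.mp
        refine ⟨v, hv, ?_⟩
        have := List.find?_some hv
        simpa using this
      obtain ⟨w, hw, hkw⟩ := hfind
      rw [hw, Option.getD_some]
      exact congrArg _ hkw

-- ===== VERDICT (by name: the statement is the Claim_ definition above) =====
theorem obtener_minimo_spec : Claim_equal_obtener_minimo := by
  intro l clave _ _
  unfold Spec_obtener_minimo
  exact obtener_minimo_spec_aux l clave
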